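-- pv_equiv track=rewrite | github.com/social-link-analytics-group-bsc/gender_bioinfo | utils.py | get_base_url
-- ===== SOURCE A (Python) =====
-- def get_base_url(full_url):
--     base_url = ''
--     slash_counter = 0
--     for c in full_url:
--         if c == '/':
--             slash_counter += 1
--         if slash_counter <= 2:
--             base_url += c
--         else:
--             break
--     return base_url
-- ===== SOURCE B (Python) =====
-- def get_base_url(full_url):
--     slash_positions = [i for i, c in enumerate(full_url) if c == '/']
--     if len(slash_positions) >= 3:
--         return full_url[:slash_positions[2]]
--     return full_url
-- ===== Notes on version B (the rewrite author's own statement) =====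
-- stated objective: alternative
-- what changed: Replaces A's char-by-char accumulator loop with a break and slash counter by computing the list of slash indices with an enumerate comprehension and slicing the string at the third one.
import Mathlib
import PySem

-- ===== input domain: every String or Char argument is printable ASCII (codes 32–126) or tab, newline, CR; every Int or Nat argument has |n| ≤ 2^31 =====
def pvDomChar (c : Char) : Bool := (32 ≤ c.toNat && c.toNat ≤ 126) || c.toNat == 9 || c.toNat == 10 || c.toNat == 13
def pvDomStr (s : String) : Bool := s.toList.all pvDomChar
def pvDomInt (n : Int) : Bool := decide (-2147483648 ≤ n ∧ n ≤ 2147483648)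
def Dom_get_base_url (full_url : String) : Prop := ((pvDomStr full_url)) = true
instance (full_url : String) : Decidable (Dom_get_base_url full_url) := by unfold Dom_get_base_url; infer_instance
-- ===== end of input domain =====

-- B replaces A's char-accumulator loop (slash counter + break) with an enumerate
-- comprehension collecting slash indices and a slice at the third one (alternative decomposition).


-- ===== PORT A =====
-- the for-loop: state = (base_url accumulator, slash_counter); break returns the accumulator
def getBaseUrlLoop : List Char → List Char → Nat → List Char
  | [], acc, _ => acc
  | c :: rest, acc, k =>
    let k' := if c = '/' then k + 1 else k
    if k' ≤ 2 then getBaseUrlLoop rest (acc ++ [c]) k' else acc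

def get_base_url (full_url : String) : String :=
  String.ofList (getBaseUrlLoop full_url.toList [] 0)

-- ===== PORT B =====
def get_base_url_alt (full_url : String) : String :=
  let slash_positions :=
    (PySem.List.enumerate full_url.toList 0).filterMap
      (fun ic => if ic.2 = '/' then some ic.1 else none)
  if h : 3 ≤ slash_positions.length then
    PySem.Str.slice full_url none (some (slash_positions[2]'(by omega)))
  else full_url

-- ===== PRECONDITION & SPEC =====
def Spec_get_base_url (full_url : String) (out : String) : Prop := out = get_base_url_alt full_url
instance (full_url : String) (out : String) : Decidable (Spec_get_base_url full_url out) := by unfold Spec_get_base_url; infer_instance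

-- ===== CLAIM (what is proved, stated in full; the proofs are below) =====
def Claim_equal_get_base_url : Prop := ∀ (full_url : String), Dom_get_base_url full_url → Spec_get_base_url full_url (get_base_url full_url)

-- ===== LEMMAS AND PROOFS =====

-- specification cut: keep chars until the (r+1)-th '/'
def pvCut : List Char → Nat → List Char
  | [], _ => []
  | c :: cs, r =>
    if c = '/' then (if r = 0 then [] else c :: pvCut cs (r - 1))
    else c :: pvCut cs r

def pvPos (cs : List Char) (n : Int) : List Int :=
  (PySem.List.enumerate cs n).filterMap (fun ic => if ic.2 = '/' then some ic.1 else none)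

theorem pvLoop_acc (cs : List Char) : ∀ (acc : List Char) (k : Nat),
    getBaseUrlLoop cs acc k = acc ++ getBaseUrlLoop cs [] k := by
  induction cs with
  | nil => intro acc k; simp [getBaseUrlLoop]
  | cons c rest ih =>
    intro acc k
    simp only [getBaseUrlLoop]
    by_cases h : (if c = '/' then k + 1 else k) ≤ 2
    · rw [if_pos h, if_pos h, ih (acc ++ [c]), ih ([] ++ [c])]; simp
    · rw [if_neg h, if_neg h]; simp

theorem pvLoop_cut (cs : List Char) : ∀ (k : Nat), k ≤ 2 →
    getBaseUrlLoop cs [] k = pvCut cs (2 - k) := by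
  induction cs with
  | nil => intro k _; simp [getBaseUrlLoop, pvCut]
  | cons c rest ih =>
    intro k hk
    simp only [getBaseUrlLoop, pvCut]
    by_cases hc : c = '/'
    · subst hc
      by_cases h2 : k + 1 ≤ 2
      · rw [if_pos (by simpa using h2), pvLoop_acc]
        simp only [reduceIte]
        rw [ih (k + 1) h2, if_neg (by omega : ¬ (2 - k = 0))]
        have : 2 - k - 1 = 2 - (k + 1) := by omega
        simp [this]
      · rw [if_neg (by simpa using h2)]
        have : 2 - k = 0 := by omega
        simp [this]
    · rw [if_neg hc, if_neg hc, if_pos (by simpa [hc] using hk), pvLoop_acc,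
        ih k hk]
      simp

theorem pvPos_mem (cs : List Char) : ∀ (n : Int), ∀ p ∈ pvPos cs n, n ≤ p := by
  induction cs with
  | nil => intro n p hp; simp [pvPos, PySem.List.enumerate_nil] at hp
  | cons c rest ih =>
    intro n p hp
    simp only [pvPos, PySem.List.enumerate_cons, List.filterMap_cons] at hp
    by_cases hc : c = '/'
    · simp only [hc, reduceIte] at hp
      rcases List.mem_cons.mp hp with h | h
      · omega
      · have := ih (n + 1) p h; omega
    · simp only [if_neg hc] at hp
      have := ih (n + 1) p hp; omega

theorem pvCut_pos (cs : List Char) : ∀ (n : Nat) (r : Nat),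
    (∀ h : r < (pvPos cs (n : Int)).length,
        pvCut cs r = cs.take (((pvPos cs (n : Int))[r]).toNat - n)) ∧
    ((pvPos cs (n : Int)).length ≤ r → pvCut cs r = cs) := by
  induction cs with
  | nil =>
    intro n r
    refine ⟨fun h => ?_, fun _ => ?_⟩
    · simp [pvPos, PySem.List.enumerate_nil] at h
    · simp [pvCut]
  | cons c rest ih =>
    intro n r
    have hcast : ((n : Int) + 1) = ((n + 1 : Nat) : Int) := by push_cast; ring
    by_cases hc : c = '/'
    · subst hc
      have hpos : pvPos ('/' :: rest) (n : Int)
          = (n : Int) :: pvPos rest ((n + 1 : Nat) : Int) := by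
        unfold pvPos
        rw [PySem.List.enumerate_cons, List.filterMap_cons, ← hcast]
        simp
      constructor
      · intro h
        simp only [hpos] at h ⊢
        match r, h with
        | 0, h => simp [pvCut]
        | r' + 1, h =>
          have h' : r' < (pvPos rest ((n + 1 : Nat) : Int)).length := by
            simpa using h
          have hmem : ((n + 1 : Nat) : Int) ≤ (pvPos rest ((n + 1 : Nat) : Int))[r']'h' :=
            pvPos_mem rest _ _ (List.getElem_mem h')
          have hih := (ih (n + 1) r').1 h'
          simp only [List.getElem_cons_succ]
          simp only [pvCut, reduceIte, if_neg (by omega : ¬ (r' + 1 = 0)),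
            Nat.add_sub_cancel]
          rw [hih]
          have htn : ((pvPos rest ((n + 1 : Nat) : Int))[r']'h').toNat - n
              = (((pvPos rest ((n + 1 : Nat) : Int))[r']'h').toNat - (n + 1)) + 1 := by
            omega
          rw [htn, List.take_succ_cons]
      · intro h
        simp only [hpos, List.length_cons] at h
        match r, h with
        | r' + 1, h =>
          have hih := (ih (n + 1) r').2 (by omega)
          simp [pvCut, hih]
    · have hpos : pvPos (c :: rest) (n : Int) = pvPos rest ((n + 1 : Nat) : Int) := by
        unfold pvPos
        rw [PySem.List.enumerate_cons, List.filterMap_cons, ← hcast]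
        simp [hc]
      constructor
      · intro h
        simp only [hpos] at h ⊢
        have hmem : ((n + 1 : Nat) : Int) ≤ (pvPos rest ((n + 1 : Nat) : Int))[r]'h :=
          pvPos_mem rest _ _ (List.getElem_mem h)
        have hih := (ih (n + 1) r).1 h
        simp only [pvCut, if_neg hc]
        rw [hih]
        have htn : ((pvPos rest ((n + 1 : Nat) : Int))[r]'h).toNat - n
            = (((pvPos rest ((n + 1 : Nat) : Int))[r]'h).toNat - (n + 1)) + 1 := by
          omega
        rw [htn, List.take_succ_cons]
      · intro h
        simp only [hpos] at h
        have hih := (ih (n + 1) r).2 h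
        simp [pvCut, hc, hih]

-- ===== VERDICT (by name: the statement is the Claim_ definition above) =====
theorem get_base_url_spec : Claim_equal_get_base_url := by
  intro s _
  unfold Spec_get_base_url get_base_url get_base_url_alt
  rw [pvLoop_cut s.toList 0 (by omega)]
  have hpos0 : ((PySem.List.enumerate s.toList 0).filterMap
      (fun ic => if ic.2 = '/' then some ic.1 else none)) = pvPos s.toList ((0 : Nat) : Int) := by
    simp [pvPos]
  simp only [hpos0]
  by_cases h : 3 ≤ (pvPos s.toList ((0 : Nat) : Int)).length
  · rw [dif_pos h]
    have h2 : 2 < (pvPos s.toList ((0 : Nat) : Int)).length := by omega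
    have hcut := (pvCut_pos s.toList 0 2).1 h2
    have hnn : (0 : Int) ≤ (pvPos s.toList ((0 : Nat) : Int))[2]'h2 := by
      simpa using pvPos_mem s.toList ((0 : Nat) : Int) _ (List.getElem_mem h2)
    apply String.toList_inj.mp
    simp only [PySem.Str.toList_slice, PySem.Chars.slice_eq_listSlice]
    rw [PySem.List.slice_to _ hnn]
    rw [hcut]
    simp
  · rw [dif_neg h]
    have := (pvCut_pos s.toList 0 2).2 (by omega)
    rw [this]
    simp
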